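-- pv_equiv track=rewrite | github.com/kennedyshead/prove | prove-py/src/prove/checker.py | _compute_recursive_group
-- ===== SOURCE A (Python) =====
-- def _compute_recursive_group(start: str, refs: dict[str, set[str]]) -> set[str]:
--     """Compute the set of types reachable from *start* through recursive refs."""
--     group: set[str] = set()
--     stack = [start]
--     while stack:
--         name = stack.pop()
--         if name in group:
--             continue
--         group.add(name)
--         for ref in refs.get(name, set()):
--             if ref not in group:
--                 stack.append(ref)
--     return group
-- ===== SOURCE B (Python) =====
-- def _compute_recursive_group(start: str, refs: dict[str, set[str]]) -> set[str]:
--     """Compute the set of types reachable from *start* through recursive refs.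
--
--     Recursive depth-first search: the call stack replaces A's explicit stack;
--     the only state kept is the group/visited set itself.
--     """
--     group: set[str] = set()
--
--     def visit(name: str) -> None:
--         if name in group:
--             return
--         group.add(name)
--         for ref in refs.get(name, set()):
--             visit(ref)
--
--     visit(start)
--     return group
-- ===== Notes on version B (the rewrite author's own statement) =====
-- stated objective: alternative
-- what changed: Replaces the explicit worklist stack with a recursive depth-first search: a nested visit() adds the node to the group if unseen and recurses over its refs, so the pre-push 'not in group' filter and the stack disappear and the call stack carries the traversal.
import Mathlib
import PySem

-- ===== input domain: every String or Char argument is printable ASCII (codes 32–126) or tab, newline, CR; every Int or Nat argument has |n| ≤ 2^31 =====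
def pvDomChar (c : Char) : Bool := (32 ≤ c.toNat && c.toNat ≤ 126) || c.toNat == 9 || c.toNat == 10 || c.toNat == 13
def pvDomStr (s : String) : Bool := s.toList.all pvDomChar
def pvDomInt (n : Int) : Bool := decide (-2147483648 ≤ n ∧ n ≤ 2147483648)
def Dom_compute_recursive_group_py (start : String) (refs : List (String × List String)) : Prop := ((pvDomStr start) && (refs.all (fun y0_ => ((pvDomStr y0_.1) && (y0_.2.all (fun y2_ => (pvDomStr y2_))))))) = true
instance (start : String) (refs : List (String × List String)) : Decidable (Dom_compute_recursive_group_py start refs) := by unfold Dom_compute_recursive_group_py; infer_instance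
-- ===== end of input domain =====

-- B replaces A's explicit worklist stack by a recursive depth-first search (same reachable set; equal cost).
-- Python iterates its sets in unspecified hash order; both ports fix the neighbour list's order (A pops the
-- first-listed neighbour first, matching B's recursion order) — the returned set does not depend on it.


-- ===== PORT A =====
-- shared helpers: dict lookup `refs.get(name, set())` (first match on the association list)
def pvRefsGet : List (String × List String) → String → List String
  | [], _ => []
  | (k, v) :: rest, name => if k == name then v else pvRefsGet rest name

-- every name the algorithm can ever see (start, the dict's keys, every referenced name);
-- used only as a termination measure / fuel bound, never to change a computed value
def pvUniv (start : String) (refs : List (String × List String)) : List String :=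
  start :: refs.flatMap (fun p => p.1 :: p.2)

def pvE (refs : List (String × List String)) : Nat := (refs.flatMap Prod.snd).length

def pvFresh (start : String) (refs : List (String × List String)) (g : List String) : Nat :=
  ((pvUniv start refs).filter (fun x => !(g.contains x))).length

-- termination lemmas for pvLoopA (cited in its decreasing_by)
theorem pv_filter_mono {p q : String → Bool} (l : List String)
    (h : ∀ x ∈ l, p x = true → q x = true) :
    (l.filter p).length ≤ (l.filter q).length := by
  induction l with
  | nil => simp
  | cons a l ih =>
    have ih' := ih (fun x hx => h x (List.mem_cons_of_mem _ hx))
    by_cases hp : p a = true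
    · have hq := h a (List.mem_cons_self) hp
      simp only [List.filter_cons, hp, hq, if_true, List.length_cons]
      omega
    · simp only [List.filter_cons, hp, if_false, Bool.false_eq_true]
      split
      · simp only [List.length_cons]; omega
      · exact ih'

theorem pv_length_filter_ne_lt {l : List String} {n : String} (hn : n ∈ l) :
    (l.filter (fun x => !(x == n))).length < l.length := by
  induction l with
  | nil => cases hn
  | cons a l ih =>
    by_cases ha : a = n
    · subst ha
      simp only [List.filter_cons, BEq.rfl, Bool.not_true, if_false, Bool.false_eq_true,
        List.length_cons]
      exact Nat.lt_succ_of_le (List.length_filter_le _ _)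
    · have hn' : n ∈ l := by
        rcases List.mem_cons.mp hn with h | h
        · exact absurd h.symm ha
        · exact h
      simp only [List.filter_cons]
      have hbe : (a == n) = false := by simp [ha]
      simp only [hbe, Bool.not_false, if_true, List.length_cons]
      exact Nat.succ_lt_succ (ih hn')

theorem pv_contains_eq_false {l : List String} {x : String} (h : x ∉ l) :
    l.contains x = false := by
  cases hc : l.contains x
  · rfl
  · exact absurd (List.contains_iff_mem.mp hc) h

theorem pv_contains_add {g : List String} {x n : String}
    (h : g.contains x = true) : List.contains (PySem.Set.add g n) x = true := by
  rw [List.contains_iff_mem] at h ⊢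
  exact (PySem.Set.mem_add g n x).mpr (Or.inl h)

theorem pvFresh_add_le (start : String) (refs : List (String × List String))
    (g : List String) (n : String) :
    pvFresh start refs (PySem.Set.add g n) ≤ pvFresh start refs g := by
  apply pv_filter_mono
  intro x _ hx
  simp only [Bool.not_eq_true'] at hx ⊢
  by_contra hc
  simp only [Bool.not_eq_false] at hc
  have := pv_contains_add (n := n) hc
  rw [this] at hx
  cases hx

theorem pvFresh_add_lt {start : String} {refs : List (String × List String)}
    {g : List String} {n : String} (hn : n ∈ pvUniv start refs)
    (hg : g.contains n = false) :
    pvFresh start refs (PySem.Set.add g n) < pvFresh start refs g := by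
  have hnm : n ∉ g := by
    intro h
    rw [(List.contains_iff_mem).mpr h] at hg
    cases hg
  have hadd : PySem.Set.add g n = g ++ [n] := PySem.Set.add_of_not_mem hnm
  unfold pvFresh
  have hstep : ((pvUniv start refs).filter (fun x => !(List.contains (PySem.Set.add g n) x))).length ≤
      (((pvUniv start refs).filter (fun x => !(g.contains x))).filter (fun x => !(x == n))).length := by
    rw [List.filter_filter]
    apply pv_filter_mono
    intro x _ hx
    rw [hadd] at hx
    simp only [Bool.not_eq_true'] at hx
    have hx' : x ∉ g ++ [n] := by
      intro hm
      rw [List.contains_iff_mem.mpr hm] at hx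
      cases hx
    simp only [List.mem_append, List.mem_singleton, not_or] at hx'
    have h1 : (x == n) = false := by simp [hx'.2]
    have h2 : g.contains x = false := pv_contains_eq_false hx'.1
    simp [h1, hx'.1]
  have hmem : n ∈ (pvUniv start refs).filter (fun x => !(g.contains x)) := by
    rw [List.mem_filter]
    exact ⟨hn, by simp [hnm]⟩
  exact Nat.lt_of_le_of_lt hstep (pv_length_filter_ne_lt hmem)

theorem pvRefsGet_length_le (refs : List (String × List String)) (name : String) :
    (pvRefsGet refs name).length ≤ pvE refs := by
  induction refs with
  | nil => simp [pvRefsGet, pvE]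
  | cons p rest ih =>
    obtain ⟨k, v⟩ := p
    unfold pvRefsGet pvE
    simp only [List.flatMap_cons, List.length_append]
    split
    · omega
    · have := ih; unfold pvE at this; omega

-- PORT A: literal transliteration of A's while-loop.  State = (group, stack); the stack's
-- TOP is the list head (Python appends/pops at the same end).  The `name ∈ pvUniv` test is a
-- pure termination guard: when it fails, pvRefsGet refs name = [] (pvRefsGet_eq_nil below),
-- so the skipped push is empty and both branches compute the same value (pvLoopA_fresh below).
def pvLoopA (start : String) (refs : List (String × List String))
    (group : List String) (stack : List String) : List String :=
  match stack with
  | [] => group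
  | name :: rest =>
    if _hc : group.contains name then pvLoopA start refs group rest
    else if _hn : name ∈ pvUniv start refs then
      pvLoopA start refs (PySem.Set.add group name)
        (((pvRefsGet refs name).filter
            (fun r => !(List.contains (PySem.Set.add group name) r))) ++ rest)
    else
      pvLoopA start refs (PySem.Set.add group name) rest
termination_by pvFresh start refs group * (pvE refs + 2) + stack.length
decreasing_by
  · simp only [List.length_cons]; omega
  · have h1 := pvFresh_add_lt _hn (by simpa using _hc)
    have h2 := pvRefsGet_length_le refs name
    have h3 := List.length_filter_le
      (fun r => !(List.contains (PySem.Set.add group name) r)) (pvRefsGet refs name)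
    simp only [List.length_append, List.length_cons]
    have hmul : pvFresh start refs (PySem.Set.add group name) * (pvE refs + 2) + (pvE refs + 2) ≤
        pvFresh start refs group * (pvE refs + 2) := by
      have := Nat.succ_le_of_lt h1
      calc pvFresh start refs (PySem.Set.add group name) * (pvE refs + 2) + (pvE refs + 2)
          = (pvFresh start refs (PySem.Set.add group name) + 1) * (pvE refs + 2) := by ring
        _ ≤ pvFresh start refs group * (pvE refs + 2) :=
            Nat.mul_le_mul_right _ this
    omega
  · have h1 := pvFresh_add_le start refs group name
    have hmul : pvFresh start refs (PySem.Set.add group name) * (pvE refs + 2) ≤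
        pvFresh start refs group * (pvE refs + 2) := Nat.mul_le_mul_right _ h1
    simp only [List.length_cons]
    omega

def compute_recursive_group_py (start : String) (refs : List (String × List String)) : List String :=
  pvLoopA start refs [] [start]

-- ===== PORT B =====
-- PORT B: recursive depth-first search (Source B's visit).  The fuel argument is a pure
-- totality device (recursion depth is bounded by the number of distinct reachable names);
-- the entry fuel (pvUniv …).length + 1 is proved never to run out.
def pvDfsB (refs : List (String × List String)) : Nat → List String → String → List String
  | 0, group, _ => group
  | fuel + 1, group, name =>
    if group.contains name then group
    else (pvRefsGet refs name).foldl (fun g r => pvDfsB refs fuel g r)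
      (PySem.Set.add group name)

def compute_recursive_group_py_alt (start : String) (refs : List (String × List String)) : List String :=
  pvDfsB refs ((pvUniv start refs).length + 1) [] start

-- ===== PRECONDITION & SPEC =====
def Spec_compute_recursive_group_py (start : String) (refs : List (String × List String)) (out : List String) : Prop := out = compute_recursive_group_py_alt start refs
instance (start : String) (refs : List (String × List String)) (out : List String) : Decidable (Spec_compute_recursive_group_py start refs out) := by unfold Spec_compute_recursive_group_py; infer_instance

-- ===== CLAIM (what is proved, stated in full; the proofs are below) =====
def Claim_equal_compute_recursive_group_py : Prop := ∀ (start : String) (refs : List (String × List String)), Dom_compute_recursive_group_py start refs → Spec_compute_recursive_group_py start refs (compute_recursive_group_py start refs)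

-- ===== LEMMAS AND PROOFS =====

theorem pvUniv_cons (start : String) (p : String × List String)
    (rest : List (String × List String)) (x : String)
    (hx : x ∈ pvUniv start rest) : x ∈ pvUniv start (p :: rest) := by
  simp only [pvUniv, List.flatMap_cons, List.mem_cons, List.mem_append] at hx ⊢
  tauto

theorem pvRefsGet_eq_nil {start n : String} {refs : List (String × List String)}
    (h : n ∉ pvUniv start refs) : pvRefsGet refs n = [] := by
  induction refs with
  | nil => rfl
  | cons p rest ih =>
    obtain ⟨k, v⟩ := p
    unfold pvRefsGet
    by_cases hk : (k == n) = true
    · exfalso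
      apply h
      have : k = n := by simpa using hk
      subst this
      simp [pvUniv, List.flatMap_cons]
    · rw [if_neg hk]
      exact ih (fun hm => h (pvUniv_cons start (k, v) rest n hm))

theorem pv_add_prefix (g : List String) (x : String) : g <+: PySem.Set.add g x := by
  by_cases h : x ∈ g
  · rw [PySem.Set.add_of_mem h]
  · rw [PySem.Set.add_of_not_mem h]
    exact List.prefix_append g [x]

theorem pv_foldl_prefix {f : List String → String → List String}
    (hf : ∀ a x, a <+: f a x) :
    ∀ (l : List String) (a : List String), a <+: List.foldl f a l := by
  intro l
  induction l with
  | nil => intro a; exact List.prefix_rfl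
  | cons x l ih =>
    intro a
    exact (hf a x).trans (ih (f a x))

theorem pvDfsB_prefix (refs : List (String × List String)) :
    ∀ (fuel : Nat) (g : List String) (n : String), g <+: pvDfsB refs fuel g n := by
  intro fuel
  induction fuel with
  | zero => intro g n; exact List.prefix_rfl
  | succ fuel ih =>
    intro g n
    unfold pvDfsB
    split
    · exact List.prefix_rfl
    · exact (pv_add_prefix g n).trans (pv_foldl_prefix (fun a x => ih a x) _ _)

theorem pvFresh_le_of_subset {start : String} {refs : List (String × List String)}
    {g g' : List String} (h : ∀ x, x ∈ g → x ∈ g') :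
    pvFresh start refs g' ≤ pvFresh start refs g := by
  apply pv_filter_mono
  intro x _ hx
  simp only [Bool.not_eq_true', ← Bool.not_eq_true, List.contains_iff_mem] at hx ⊢
  exact fun hm => hx (h x hm)

theorem pvFresh_pos {start n : String} {refs : List (String × List String)}
    {g : List String} (hn : n ∈ pvUniv start refs) (hg : n ∉ g) :
    0 < pvFresh start refs g := by
  apply List.length_pos_of_mem (a := n)
  rw [List.mem_filter]
  refine ⟨hn, ?_⟩
  simp [hg]

theorem pvDfsB_skip {refs : List (String × List String)} {g : List String} {n : String}
    (h : g.contains n = true) : ∀ fuel, pvDfsB refs fuel g n = g := by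
  intro fuel
  have hm : n ∈ g := List.contains_iff_mem.mp h
  cases fuel with
  | zero => rfl
  | succ fuel => simp [pvDfsB, hm]

-- fuel irrelevance: any two fuels strictly above pvFresh give the same result
theorem pvDfsB_irrel (start : String) (refs : List (String × List String)) :
    ∀ (F : Nat) (g : List String) (n : String) (k k' : Nat),
      pvFresh start refs g ≤ F → pvFresh start refs g < k → pvFresh start refs g < k' →
      pvDfsB refs k g n = pvDfsB refs k' g n := by
  intro F
  induction F with
  | zero =>
    intro g n k k' hF hk hk'
    cases k with
    | zero => omega
    | succ a =>
      cases k' with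
      | zero => omega
      | succ b =>
        unfold pvDfsB
        by_cases hm : n ∈ g
        · simp [hm]
        · by_cases hn : n ∈ pvUniv start refs
          · have : 0 < pvFresh start refs g := pvFresh_pos hn hm
            omega
          · rw [pvRefsGet_eq_nil hn]
            simp
  | succ F ih =>
    intro g n k k' hF hk hk'
    cases k with
    | zero => omega
    | succ a =>
      cases k' with
      | zero => omega
      | succ b =>
        unfold pvDfsB
        by_cases hm : n ∈ g
        · simp [hm]
        · have h' : ¬ (g.contains n = true) := fun h => hm (List.contains_iff_mem.mp h)
          rw [if_neg h', if_neg h']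
          by_cases hn : n ∈ pvUniv start refs
          · have hlt : pvFresh start refs (PySem.Set.add g n) < pvFresh start refs g :=
              pvFresh_add_lt hn (pv_contains_eq_false hm)
            have haux : ∀ (l : List String) (acc : List String),
                pvFresh start refs acc < pvFresh start refs g →
                l.foldl (fun g r => pvDfsB refs a g r) acc =
                l.foldl (fun g r => pvDfsB refs b g r) acc := by
              intro l
              induction l with
              | nil => intro acc _; rfl
              | cons x l ihl =>
                intro acc hacc
                have hhead : pvDfsB refs a acc x = pvDfsB refs b acc x := by
                  apply ih acc x a b
                  · omega
                  · omega
                  · omega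
                simp only [List.foldl_cons, hhead]
                apply ihl
                have hsub := (pvDfsB_prefix refs b acc x).subset
                exact Nat.lt_of_le_of_lt
                  (pvFresh_le_of_subset (fun y hy => hsub hy)) hacc
            exact haux _ _ hlt
          · rw [pvRefsGet_eq_nil hn]
            rfl
-- the DFS step with its canonical fuel pvFresh+1: the common value both ports compute with
def pvD (start : String) (refs : List (String × List String))
    (g : List String) (n : String) : List String :=
  pvDfsB refs (pvFresh start refs g + 1) g n

theorem pvD_skip {start : String} {refs : List (String × List String)}
    {g : List String} {n : String} (h : g.contains n = true) :
    pvD start refs g n = g := pvDfsB_skip h _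

theorem pvD_prefix (start : String) (refs : List (String × List String))
    (g : List String) (n : String) : g <+: pvD start refs g n :=
  pvDfsB_prefix refs _ g n

theorem pv_foldl_dfs_eq_foldl_pvD (start : String) (refs : List (String × List String))
    (k : Nat) :
    ∀ (l : List String) (acc : List String), pvFresh start refs acc < k →
      l.foldl (fun g r => pvDfsB refs k g r) acc = l.foldl (pvD start refs) acc := by
  intro l
  induction l with
  | nil => intro acc _; rfl
  | cons x l ih =>
    intro acc hacc
    have hhead : pvDfsB refs k acc x = pvD start refs acc x := by
      apply pvDfsB_irrel start refs (pvFresh start refs acc) acc x k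
        (pvFresh start refs acc + 1) (Nat.le_refl _) hacc (Nat.lt_succ_self _)
    simp only [List.foldl_cons, hhead]
    apply ih
    have hsub := (pvD_prefix start refs acc x).subset
    exact Nat.lt_of_le_of_lt (pvFresh_le_of_subset (fun y hy => hsub hy)) hacc

theorem pvD_unfold_fresh {start : String} {refs : List (String × List String)}
    {g : List String} {n : String} (hc : g.contains n = false)
    (hn : n ∈ pvUniv start refs) :
    pvD start refs g n = (pvRefsGet refs n).foldl (pvD start refs) (PySem.Set.add g n) := by
  have hm : n ∉ g := by
    intro h
    rw [List.contains_iff_mem.mpr h] at hc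
    cases hc
  unfold pvD pvDfsB
  rw [if_neg (fun h => hm (List.contains_iff_mem.mp h))]
  apply pv_foldl_dfs_eq_foldl_pvD
  exact pvFresh_add_lt hn hc

theorem pvD_unfold_out {start : String} {refs : List (String × List String)}
    {g : List String} {n : String} (hc : g.contains n = false)
    (hn : n ∉ pvUniv start refs) :
    pvD start refs g n = PySem.Set.add g n := by
  have hm : n ∉ g := by
    intro h
    rw [List.contains_iff_mem.mpr h] at hc
    cases hc
  unfold pvD pvDfsB
  simp [hm, pvRefsGet_eq_nil hn]

theorem pv_foldl_pvD_filter (start : String) (refs : List (String × List String))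
    (g0 : List String) :
    ∀ (l : List String) (acc : List String),
      (∀ x, g0.contains x = true → acc.contains x = true) →
      (l.filter (fun r => !(g0.contains r))).foldl (pvD start refs) acc =
      l.foldl (pvD start refs) acc := by
  intro l
  induction l with
  | nil => intro acc _; rfl
  | cons x l ih =>
    intro acc h
    by_cases hx : g0.contains x = true
    · have hxf : (!(g0.contains x)) = false := by rw [hx]; rfl
      simp only [List.filter_cons, hxf, Bool.false_eq_true, if_false, List.foldl_cons]
      rw [pvD_skip (h x hx)]
      exact ih acc h
    · have hxe : g0.contains x = false := by
        cases hb : g0.contains x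
        · rfl
        · exact absurd hb hx
      have hxb : (!(g0.contains x)) = true := by rw [hxe]; rfl
      simp only [List.filter_cons, hxb, if_true, List.foldl_cons]
      apply ih
      intro y hy
      have hsub := (pvD_prefix start refs acc x).subset
      have hym : y ∈ acc := List.contains_iff_mem.mp (h y hy)
      exact List.contains_iff_mem.mpr (hsub hym)

-- the heart of the proof: A's worklist loop folds B's recursive DFS step over the stack
theorem pvLoopA_eq_foldl (start : String) (refs : List (String × List String)) :
    ∀ (g stack : List String),
      pvLoopA start refs g stack = stack.foldl (pvD start refs) g := by
  intro g stack
  induction g, stack using pvLoopA.induct start refs with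
  | case1 g => simp [pvLoopA]
  | case2 g name rest hc ih =>
    unfold pvLoopA
    rw [dif_pos hc, ih, List.foldl_cons, pvD_skip hc]
  | case3 g name rest hc hn ih =>
    unfold pvLoopA
    rw [dif_neg hc, dif_pos hn, ih, List.foldl_append, List.foldl_cons]
    have hcf : g.contains name = false := by
      cases hb : g.contains name
      · rfl
      · exact absurd hb hc
    rw [pv_foldl_pvD_filter start refs (PySem.Set.add g name) _ _ (fun x hx => hx)]
    rw [pvD_unfold_fresh hcf hn]
  | case4 g name rest hc hn ih =>
    unfold pvLoopA
    rw [dif_neg hc, dif_neg hn, ih, List.foldl_cons]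
    have hcf : g.contains name = false := by
      cases hb : g.contains name
      · rfl
      · exact absurd hb hc
    rw [pvD_unfold_out hcf hn]

theorem pvFresh_nil (start : String) (refs : List (String × List String)) :
    pvFresh start refs [] = (pvUniv start refs).length := by
  simp [pvFresh]

-- ===== VERDICT (by name: the statement is the Claim_ definition above) =====
theorem compute_recursive_group_py_spec : Claim_equal_compute_recursive_group_py := by
  intro start refs _
  unfold Spec_compute_recursive_group_py
  unfold compute_recursive_group_py compute_recursive_group_py_alt
  rw [pvLoopA_eq_foldl]
  simp only [List.foldl_cons, List.foldl_nil]
  unfold pvD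
  rw [pvFresh_nil]
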